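-- pv_equiv track=rewrite | github.com/synqing/PRISM.k1 | tools/show_to_prism.py | _segment_counts
-- ===== SOURCE A (Python) =====
-- from typing import Dict, List, Optional, Sequence, Tuple, Any
--
-- def _segment_counts(stops: Sequence[Tuple[float, ...]], steps: int) -> List[int]:
--     segments = max(1, len(stops) - 1)
--     counts = [steps // segments] * segments
--     remainder = steps - sum(counts)
--     idx = 0
--     while remainder > 0:
--         counts[idx] += 1
--         idx = (idx + 1) % segments
--         remainder -= 1
--     return counts
-- ===== SOURCE B (Python) =====
-- def _segment_counts(stops, steps):
--     segments = max(1, len(stops) - 1)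
--     base, rem = divmod(steps, segments)
--     return [base + (1 if i < rem else 0) for i in range(segments)]
-- ===== Notes on version B (the rewrite author's own statement) =====
-- stated objective: simpler
-- what changed: Replaces the fill-then-distribute mutation loop with a closed-form divmod: each index i gets base + (1 if i < rem else 0), built directly by a comprehension.
import Mathlib
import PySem

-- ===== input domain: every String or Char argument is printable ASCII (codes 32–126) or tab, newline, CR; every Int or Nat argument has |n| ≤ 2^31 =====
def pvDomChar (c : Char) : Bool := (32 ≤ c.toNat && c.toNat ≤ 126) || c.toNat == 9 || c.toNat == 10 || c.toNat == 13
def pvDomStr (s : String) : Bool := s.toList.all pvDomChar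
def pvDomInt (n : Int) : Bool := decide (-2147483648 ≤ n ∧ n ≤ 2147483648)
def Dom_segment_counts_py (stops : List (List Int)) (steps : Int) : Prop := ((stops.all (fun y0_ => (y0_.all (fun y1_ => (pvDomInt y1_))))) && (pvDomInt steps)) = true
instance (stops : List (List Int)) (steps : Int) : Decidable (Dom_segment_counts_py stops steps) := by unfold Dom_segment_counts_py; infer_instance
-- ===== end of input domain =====

-- B replaces A's fill-then-distribute mutation loop with a closed-form divmod per index (simpler).


-- ===== PORT A =====
-- the while loop: counts[idx] += 1; idx = (idx+1) % segments; remainder -= 1 — whilst remainder > 0.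
-- idx is always a valid nonneg index, so Nat indexing/mod are exact here.
def segALoop (counts : List Int) (idx : Nat) (remainder : Int) : List Int :=
  if remainder > 0 then
    segALoop (counts.set idx (counts.getD idx 0 + 1)) ((idx + 1) % counts.length) (remainder - 1)
  else counts
termination_by remainder.toNat
decreasing_by omega

def segment_counts_py (stops : List (List Int)) (steps : Int) : List Int :=
  let segments : Int := max 1 ((stops.length : Int) - 1)
  let counts : List Int := List.replicate segments.toNat (PySem.Int.floordiv steps segments)
  let remainder : Int := steps - counts.sum
  segALoop counts 0 remainder

-- ===== PORT B =====
def segment_counts_py_alt (stops : List (List Int)) (steps : Int) : List Int :=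
  let segments : Int := max 1 ((stops.length : Int) - 1)
  let base : Int := PySem.Int.floordiv steps segments
  let rem : Int := PySem.Int.mod steps segments
  (List.range segments.toNat).map (fun (i : Nat) => base + if (i : Int) < rem then 1 else 0)

-- ===== PRECONDITION & SPEC =====
def Spec_segment_counts_py (stops : List (List Int)) (steps : Int) (out : List Int) : Prop := out = segment_counts_py_alt stops steps
instance (stops : List (List Int)) (steps : Int) (out : List Int) : Decidable (Spec_segment_counts_py stops steps out) := by unfold Spec_segment_counts_py; infer_instance

-- ===== CLAIM (what is proved, stated in full; the proofs are below) =====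
def Claim_equal_segment_counts_py : Prop := ∀ (stops : List (List Int)) (steps : Int), Dom_segment_counts_py stops steps → Spec_segment_counts_py stops steps (segment_counts_py stops steps)

-- ===== LEMMAS AND PROOFS =====

-- The loop, started at position pre.length on pre ++ replicate m b with k ≤ m more increments to do,
-- increments the next k copies of b.
theorem segALoop_spec (k : Nat) (pre : List Int) (b : Int) (m : Nat) (hk : k ≤ m) :
    segALoop (pre ++ List.replicate m b) pre.length (k : Int) =
      pre ++ List.replicate k (b + 1) ++ List.replicate (m - k) b := by
  induction k generalizing pre m with
  | zero => rw [segALoop]; simp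
  | succ k ih =>
    obtain ⟨m', rfl⟩ : ∃ m', m = m' + 1 := ⟨m - 1, by omega⟩
    rw [segALoop]
    have hpos : ((k : Int) + 1 > 0) := by positivity
    have hget : (pre ++ List.replicate (m' + 1) b).getD pre.length 0 = b := by
      simp [List.getD, List.replicate_succ]
    have hset : (pre ++ List.replicate (m' + 1) b).set pre.length (b + 1)
        = (pre ++ [b + 1]) ++ List.replicate m' b := by
      simp [List.replicate_succ, List.set_append_right _ _ (le_refl pre.length)]
    push_cast
    rw [if_pos hpos, hget, hset]
    have harith : ((k : Int) + 1 - 1) = (k : Int) := by ring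
    rw [harith]
    by_cases hm : m' = 0
    · -- k + 1 ≤ m' + 1 forces k = 0; the loop stops immediately, idx is irrelevant
      have hk0 : k = 0 := by omega
      subst hm hk0
      rw [segALoop]
      simp
    · have hlenL : (pre ++ List.replicate (m' + 1) b).length = pre.length + (m' + 1) := by simp
      have hidx : (pre.length + 1) % (pre ++ List.replicate (m' + 1) b).length = pre.length + 1 := by
        rw [hlenL]; exact Nat.mod_eq_of_lt (by omega)
      rw [hidx]
      have hidx2 : pre.length + 1 = (pre ++ [b + 1]).length := by simp
      rw [hidx2, ih (pre ++ [b + 1]) m' (by omega)]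
      simp [List.replicate_succ, List.append_assoc]

-- B's comprehension is the same split list.
theorem alt_map_eq (b r : Int) (n : Nat) (hr0 : 0 ≤ r) (hrn : r < (n : Int)) :
    (List.range n).map (fun (i : Nat) => b + if (i : Int) < r then 1 else 0) =
      List.replicate r.toNat (b + 1) ++ List.replicate (n - r.toNat) b := by
  apply List.ext_getElem
  · simp; omega
  · intro i h1 h2
    have hi : i < n := by simpa using h1
    rw [List.getElem_map, List.getElem_range]
    by_cases hlt : (i : Int) < r
    · have hi' : i < r.toNat := by omega
      rw [List.getElem_append_left (by simpa using hi')]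
      simp [hlt]
    · have hi' : ¬ i < r.toNat := by omega
      rw [List.getElem_append_right (by simpa using hi')]
      simp [hlt]

-- ===== VERDICT (by name: the statement is the Claim_ definition above) =====
theorem segment_counts_py_spec : Claim_equal_segment_counts_py := by
  intro stops steps _
  unfold Spec_segment_counts_py segment_counts_py segment_counts_py_alt
  dsimp only
  set segments : Int := max 1 ((stops.length : Int) - 1) with hseg
  have hpos : 0 < segments := by rw [hseg]; exact lt_of_lt_of_le one_pos (le_max_left 1 _)
  set b : Int := PySem.Int.floordiv steps segments with hb
  have hsum : (List.replicate segments.toNat b).sum = (segments.toNat : Int) * b := by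
    simp [List.sum_replicate]
  have hcast : ((segments.toNat : Int)) = segments := Int.toNat_of_nonneg (le_of_lt hpos)
  have hrem : steps - (List.replicate segments.toNat b).sum = PySem.Int.mod steps segments := by
    rw [hsum, hcast]
    have := PySem.Int.floordiv_mul_add_mod steps segments
    rw [hb]; linarith [this]
  rw [hrem]
  set r : Int := PySem.Int.mod steps segments with hr
  have hr0 : 0 ≤ r := PySem.Int.mod_nonneg steps hpos
  have hrlt : r < segments := PySem.Int.mod_lt steps hpos
  have hr' : r = ((r.toNat : Nat) : Int) := (Int.toNat_of_nonneg hr0).symm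
  have hA := segALoop_spec r.toNat [] b segments.toNat (by omega)
  simp only [List.nil_append, List.length_nil] at hA
  rw [← hr'] at hA
  rw [hA]
  exact (alt_map_eq b r segments.toNat hr0 (by omega)).symm
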